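-- pv_equiv track=rewrite | github.com/sanghoon5499/Aiso | calculations.py | getFourCorners
-- ===== SOURCE A (Python) =====
-- def getFourCorners(pointsArray):
--
--   copyPointsArray = pointsArray[:]
--
--   topRight = list(copyPointsArray[0])
--   topLeft = list(copyPointsArray[0])
--   bottomRight = list(copyPointsArray[0])
--   bottomLeft = list(copyPointsArray[0])
--
--   for i in range(len(copyPointsArray)):
--
--     if copyPointsArray[i][0] < topLeft[0] or copyPointsArray[i][1] < topLeft[1]:
--       topLeft = list(copyPointsArray[i])
--
--     if copyPointsArray[i][0] > topRight[0] or copyPointsArray[i][1] < topRight[1]: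
--       topRight = list(copyPointsArray[i])
--
--     if copyPointsArray[i][0] > bottomRight[0] or copyPointsArray[i][1] > bottomRight[1]:
--       bottomRight = list(copyPointsArray[i])
--
--     if copyPointsArray[i][0] < bottomLeft[0] or copyPointsArray[i][1] > bottomLeft[1]:
--       bottomLeft = list(copyPointsArray[i])
--
--   # sketchy fix (repeat for other cases once example 1 works)
--   #basically wanna make sure it makes a rectangle shape for now
--   # if topLeft[1] != topRight[1]:
--   #   if topLeft[1] > topRight[1]:
--   #     topRight[1] = topLeft[1]
--
--   if topRight[0] != bottomRight[0]:
--     if topRight[0] < bottomRight[0]: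
--       topRight[0] = bottomRight[0]
--
--   return [topLeft, topRight, bottomRight, bottomLeft]
-- ===== SOURCE B (Python) =====
-- def getFourCorners(pointsArray):
--   def find_corner(better):
--     acc = list(pointsArray[0])
--     for p in pointsArray:
--       if better(p, acc):
--         acc = list(p)
--     return acc
--
--   topLeft = find_corner(lambda p, a: p[0] < a[0] or p[1] < a[1])
--   topRight = find_corner(lambda p, a: p[0] > a[0] or p[1] < a[1])
--   bottomRight = find_corner(lambda p, a: p[0] > a[0] or p[1] > a[1])
--   bottomLeft = find_corner(lambda p, a: p[0] < a[0] or p[1] > a[1])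
--
--   if topRight[0] < bottomRight[0]:
--     topRight[0] = bottomRight[0]
--
--   return [topLeft, topRight, bottomRight, bottomLeft]
-- ===== Notes on version B (the rewrite author's own statement) =====
-- stated objective: simpler
-- what changed: Replaces the single loop interleaving four independent running corners in one 4-way state with a generic find_corner fold applied four times with the four OR-predicates, plus the same final x-coordinate fixup.
import Mathlib
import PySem

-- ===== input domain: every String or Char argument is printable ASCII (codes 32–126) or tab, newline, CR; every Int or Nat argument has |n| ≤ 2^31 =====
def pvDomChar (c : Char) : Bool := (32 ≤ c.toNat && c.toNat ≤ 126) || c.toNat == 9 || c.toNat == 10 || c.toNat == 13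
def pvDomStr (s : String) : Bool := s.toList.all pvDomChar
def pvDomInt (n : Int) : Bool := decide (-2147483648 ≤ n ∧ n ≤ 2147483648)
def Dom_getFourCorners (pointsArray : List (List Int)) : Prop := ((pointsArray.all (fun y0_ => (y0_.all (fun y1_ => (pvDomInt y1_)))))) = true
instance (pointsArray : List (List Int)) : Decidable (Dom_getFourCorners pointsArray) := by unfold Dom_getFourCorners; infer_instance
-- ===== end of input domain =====

-- B replaces A's single loop carrying four interleaved corner accumulators with a generic
-- find-corner fold applied four times (simpler decomposition; same cost). Equivalence is about
-- return values; A mutates nothing observable. Pre_ excludes inputs where A raises IndexError.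


-- Python p[i] for a nonnegative literal index; exact whenever i < p.length (Pre_ guarantees
-- the indices used are in range; out of range Python raises and Pre_ excludes the input).
def pget (p : List Int) (i : Nat) : Int := PySem.List.pyGetD p (i : Int) 0

-- ===== PORT A =====
def getFourCorners (pointsArray : List (List Int)) : List (List Int) :=
  let copyPointsArray := pointsArray   -- pointsArray[:] : a copy, identical as a value
  let p0 := copyPointsArray.getD 0 []  -- copyPointsArray[0] (Pre_ excludes the empty list)
  let st := (PySem.List.pyRange 0 (PySem.List.len copyPointsArray) 1).foldl
    (fun (st : List Int × List Int × List Int × List Int) i =>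
      let p := PySem.List.pyGetD copyPointsArray i []
      ( if pget p 0 < pget st.1 0 || pget p 1 < pget st.1 1 then p else st.1,
        if pget p 0 > pget st.2.1 0 || pget p 1 < pget st.2.1 1 then p else st.2.1,
        if pget p 0 > pget st.2.2.1 0 || pget p 1 > pget st.2.2.1 1 then p else st.2.2.1,
        if pget p 0 < pget st.2.2.2 0 || pget p 1 > pget st.2.2.2 1 then p else st.2.2.2 ))
    (p0, p0, p0, p0)
  let topLeft := st.1
  let topRight := st.2.1
  let bottomRight := st.2.2.1
  let bottomLeft := st.2.2.2
  let topRight :=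
    if pget topRight 0 ≠ pget bottomRight 0 then
      if pget topRight 0 < pget bottomRight 0 then topRight.set 0 (pget bottomRight 0)
      else topRight
    else topRight
  [topLeft, topRight, bottomRight, bottomLeft]

-- ===== PORT B =====
def findCorner (points : List (List Int)) (better : List Int → List Int → Bool) : List Int :=
  points.foldl (fun acc p => if better p acc then p else acc) (points.getD 0 [])

def getFourCorners_alt (pointsArray : List (List Int)) : List (List Int) :=
  let topLeft := findCorner pointsArray (fun p a => pget p 0 < pget a 0 || pget p 1 < pget a 1)
  let topRight := findCorner pointsArray (fun p a => pget p 0 > pget a 0 || pget p 1 < pget a 1)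
  let bottomRight := findCorner pointsArray (fun p a => pget p 0 > pget a 0 || pget p 1 > pget a 1)
  let bottomLeft := findCorner pointsArray (fun p a => pget p 0 < pget a 0 || pget p 1 > pget a 1)
  let topRight := if pget topRight 0 < pget bottomRight 0 then topRight.set 0 (pget bottomRight 0) else topRight
  [topLeft, topRight, bottomRight, bottomLeft]

-- ===== PRECONDITION & SPEC =====
-- Pre_ excludes exactly the inputs on which A raises IndexError: the empty list
-- (pointsArray[0]) and rows with fewer than two coordinates (p[0]/p[1]).
def Pre_getFourCorners (pointsArray : List (List Int)) : Prop :=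
  pointsArray ≠ [] ∧ ∀ p ∈ pointsArray, 2 ≤ p.length
instance (pointsArray : List (List Int)) : Decidable (Pre_getFourCorners pointsArray) := by unfold Pre_getFourCorners; infer_instance
def pvWitness_getFourCorners : List (List Int) := [[1, 2], [3, 0], [-1, 4]]

def Spec_getFourCorners (pointsArray : List (List Int)) (out : List (List Int)) : Prop := out = getFourCorners_alt pointsArray
instance (pointsArray : List (List Int)) (out : List (List Int)) : Decidable (Spec_getFourCorners pointsArray out) := by unfold Spec_getFourCorners; infer_instance

-- ===== CLAIM (what is proved, stated in full; the proofs are below) =====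
def Claim_equal_getFourCorners : Prop := ∀ (pointsArray : List (List Int)), Dom_getFourCorners pointsArray → Pre_getFourCorners pointsArray → Spec_getFourCorners pointsArray (getFourCorners pointsArray)

-- ===== LEMMAS AND PROOFS =====

-- A's fold over the 4-tuple state updates each component independently,
-- so it is the product of the four single-corner folds B performs.
theorem fold_prod (xs : List (List Int))
    (f1 f2 f3 f4 : List Int → List Int → Bool) :
    ∀ (s1 s2 s3 s4 : List Int),
    xs.foldl
      (fun (st : List Int × List Int × List Int × List Int) p =>
        ( if f1 p st.1 then p else st.1,
          if f2 p st.2.1 then p else st.2.1,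
          if f3 p st.2.2.1 then p else st.2.2.1,
          if f4 p st.2.2.2 then p else st.2.2.2 ))
      (s1, s2, s3, s4)
    = ( xs.foldl (fun a p => if f1 p a then p else a) s1,
        xs.foldl (fun a p => if f2 p a then p else a) s2,
        xs.foldl (fun a p => if f3 p a then p else a) s3,
        xs.foldl (fun a p => if f4 p a then p else a) s4 ) := by
  induction xs with
  | nil => intro s1 s2 s3 s4; rfl
  | cons x xs ih => intro s1 s2 s3 s4; simp only [List.foldl_cons]; exact ih _ _ _ _

-- ===== VERDICT (by name: the statement is the Claim_ definition above) =====
theorem getFourCorners_spec : Claim_equal_getFourCorners := by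
  intro pointsArray _ _
  unfold Spec_getFourCorners getFourCorners getFourCorners_alt findCorner
  simp only []
  rw [PySem.List.foldl_pyRange_zero_pyGetD pointsArray ([] : List Int)
        (fun (st : List Int × List Int × List Int × List Int) p =>
          ( if pget p 0 < pget st.1 0 || pget p 1 < pget st.1 1 then p else st.1,
            if pget p 0 > pget st.2.1 0 || pget p 1 < pget st.2.1 1 then p else st.2.1,
            if pget p 0 > pget st.2.2.1 0 || pget p 1 > pget st.2.2.1 1 then p else st.2.2.1,
            if pget p 0 < pget st.2.2.2 0 || pget p 1 > pget st.2.2.2 1 then p else st.2.2.2 ))]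
  rw [fold_prod pointsArray
        (fun p a => decide (pget p 0 < pget a 0) || decide (pget p 1 < pget a 1))
        (fun p a => decide (pget p 0 > pget a 0) || decide (pget p 1 < pget a 1))
        (fun p a => decide (pget p 0 > pget a 0) || decide (pget p 1 > pget a 1))
        (fun p a => decide (pget p 0 < pget a 0) || decide (pget p 1 > pget a 1))]
  dsimp only
  set tr := pointsArray.foldl (fun a p => if pget p 0 > pget a 0 || pget p 1 < pget a 1 then p else a) (pointsArray.getD 0 []) with htr
  set br := pointsArray.foldl (fun a p => if pget p 0 > pget a 0 || pget p 1 > pget a 1 then p else a) (pointsArray.getD 0 []) with hbr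
  split_ifs with h1 h2 h3 <;> first | rfl | omega
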